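-- pv_equiv track=rewrite | github.com/16yunH/Algorithm-H-2025-Fudan | lab2/matching.py | process_matches_for_visualization
-- ===== SOURCE A (Python) =====
-- def process_matches_for_visualization(raw_matches, match_type):
--     """
--     处理原始匹配列表，识别共线段和孤立点，用于可视化。
--
--     参数:
--         raw_matches (list): 原始匹配点列表，每个元素为 (q_idx, r_idx, score)。
--         match_type (str): 匹配类型，"forward" 或 "rc"。
--
--     返回:
--         tuple: (segments, isolated_points_data)
--                segments: 共线段列表，每个元素为 (q_start, r_start, q_end, r_end)。
--                isolated_points_data: 孤立点列表，每个元素为 (q, r, score)。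
--     """
--     if not raw_matches:
--         return [], []
--
--     # 将匹配点及其分数存储在字典中，方便查找
--     points_with_scores = {(m[0], m[1]): m[2] for m in raw_matches}
--     available_points = set(points_with_scores.keys()) # 所有可用匹配点
--
--     segments = [] # 存储识别出的共线段
--     isolated_points_data = [] # 存储识别出的孤立点
--
--     # 按 q_idx, r_idx 排序，确保处理顺序一致
--     sorted_unique_points = sorted(list(available_points), key=lambda p: (p[0], p[1]))
--
--     visited_in_segment = set() # 记录已包含在某个段中的点
--
--     for q_start, r_start in sorted_unique_points:
--         if (q_start, r_start) in visited_in_segment: # 如果点已处理过，则跳过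
--             continue
--
--         current_segment_path = [(q_start, r_start)] # 当前段的路径
--         q_curr, r_curr = q_start, r_start
--
--         # 尝试扩展当前段
--         while True:
--             if match_type == "forward": # 正向匹配，下一个点应该是 (q+1, r+1)
--                 q_next, r_next = q_curr + 1, r_curr + 1
--             else: # 反向互补匹配，下一个点应该是 (q+1, r-1)
--                 q_next, r_next = q_curr + 1, r_curr - 1
--
--             # 如果下一个点存在且未被访问过
--             if (q_next, r_next) in available_points and (q_next, r_next) not in visited_in_segment:
--                 current_segment_path.append((q_next, r_next))
--                 q_curr, r_curr = q_next, r_next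
--             else:
--                 break # 无法扩展或下一点已被使用
--
--         if len(current_segment_path) > 1: # 如果路径长度大于1，则认为是一个段
--             seg_q_start_coord, seg_r_start_coord = current_segment_path[0]
--             seg_q_end_coord, seg_r_end_coord = current_segment_path[-1]
--             segments.append((seg_q_start_coord, seg_r_start_coord, seg_q_end_coord, seg_r_end_coord))
--             for p_item in current_segment_path: # 将段中的所有点标记为已访问
--                 visited_in_segment.add(p_item)
--
--     # 收集孤立点：任何未包含在段中的原始匹配点
--     for q, r in sorted_unique_points:
--         if (q, r) not in visited_in_segment:
--             isolated_points_data.append((q, r, points_with_scores[(q,r)]))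
--
--     return segments, isolated_points_data
-- ===== SOURCE B (Python) =====
-- def process_matches_for_visualization(raw_matches, match_type):
--     """Single stateless pass: classify each sorted point locally via a
--     predecessor test (no visited set, no path list, no second pass)."""
--     if not raw_matches:
--         return [], []
--     scores = {(m[0], m[1]): m[2] for m in raw_matches}
--     pts = set(scores)
--     dr = 1 if match_type == "forward" else -1
--     segments, isolated = [], []
--     for q, r in sorted(pts):
--         if (q - 1, r - dr) in pts:
--             continue  # not the start of its diagonal run
--         qe, re = q, r
--         while (qe + 1, re + dr) in pts:
--             qe, re = qe + 1, re + dr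
--         if (qe, re) != (q, r):
--             segments.append((q, r, qe, re))
--         else:
--             isolated.append((q, r, scores[(q, r)]))
--     return segments, isolated
-- ===== Notes on version B (the rewrite author's own statement) =====
-- stated objective: simpler
-- what changed: A extends greedy paths while maintaining a visited set, an explicit path list and a second collection pass; B makes one stateless pass over the sorted points, classifying each point locally by a predecessor-membership test (run start or not) and chasing only run starts to their diagonal end, with no visited set, no path accumulation and no second pass.
import Mathlib
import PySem

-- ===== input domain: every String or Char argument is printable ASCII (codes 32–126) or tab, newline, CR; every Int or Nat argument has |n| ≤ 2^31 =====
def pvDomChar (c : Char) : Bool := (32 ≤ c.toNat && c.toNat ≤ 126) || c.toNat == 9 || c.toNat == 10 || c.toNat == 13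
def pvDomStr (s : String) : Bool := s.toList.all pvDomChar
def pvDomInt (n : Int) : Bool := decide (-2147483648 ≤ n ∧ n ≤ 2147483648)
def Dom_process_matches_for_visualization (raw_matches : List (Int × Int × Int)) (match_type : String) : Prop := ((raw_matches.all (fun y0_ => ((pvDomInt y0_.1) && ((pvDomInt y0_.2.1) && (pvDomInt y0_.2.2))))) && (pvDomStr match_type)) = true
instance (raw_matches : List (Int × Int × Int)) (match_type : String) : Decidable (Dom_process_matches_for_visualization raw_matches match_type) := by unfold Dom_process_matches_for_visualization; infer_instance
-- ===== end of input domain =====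

-- B replaces A's visited-set bookkeeping, path accumulation and second pass by a single
-- stateless pass that classifies each sorted point locally (objective: simpler; same cost).

-- ===== PORT A =====
-- A's inner `while True` extension loop; the fuel argument only bounds the number of
-- iterations (fuel = number of points is proved sufficient below), it adds no behaviour.
def pmfvExtendA (avail visited : PySem.Set (Int × Int)) (match_type : String) :
    Nat → List (Int × Int) → (Int × Int) → List (Int × Int) × (Int × Int)
  | 0, path, cur => (path, cur)
  | fuel + 1, path, cur =>
    let nxt : Int × Int :=
      if match_type == "forward" then (cur.1 + 1, cur.2 + 1) else (cur.1 + 1, cur.2 - 1)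
    if PySem.Set.contains avail nxt && !(PySem.Set.contains visited nxt) then
      pmfvExtendA avail visited match_type fuel (path ++ [nxt]) nxt
    else (path, cur)

-- body of A's main `for` loop (state = (segments, visited_in_segment))
def pmfvStepA (avail : PySem.Set (Int × Int)) (match_type : String) (fuel : Nat)
    (st : List (Int × Int × Int × Int) × PySem.Set (Int × Int)) (p : Int × Int) :
    List (Int × Int × Int × Int) × PySem.Set (Int × Int) :=
  if PySem.Set.contains st.2 p then st
  else
    let ext := pmfvExtendA avail st.2 match_type fuel [p] p
    if 1 < ext.1.length then
      -- current_segment_path[0] / current_segment_path[-1] (path is nonempty, so exact)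
      (st.1 ++ [((PySem.List.pyGetD ext.1 0 p).1, (PySem.List.pyGetD ext.1 0 p).2,
                 (PySem.List.pyGetD ext.1 (-1) p).1, (PySem.List.pyGetD ext.1 (-1) p).2)],
       ext.1.foldl PySem.Set.add st.2)
    else st

-- body of A's second `for` loop (collect isolated points); points_with_scores[(q,r)]
-- is ported as getD _ 0: the key is always present
def pmfvIsoStepA (pws : PySem.Dict (Int × Int) Int) (visited : PySem.Set (Int × Int))
    (acc : List (Int × Int × Int)) (p : Int × Int) : List (Int × Int × Int) :=
  if PySem.Set.contains visited p then acc else acc ++ [(p.1, p.2, pws.getD p 0)]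

def process_matches_for_visualization (raw_matches : List (Int × Int × Int)) (match_type : String) :
    (List (Int × Int × Int × Int)) × (List (Int × Int × Int)) :=
  match raw_matches with
  | [] => ([], [])
  | _ :: _ =>
    let points_with_scores : PySem.Dict (Int × Int) Int :=
      raw_matches.foldl (fun d m => d.insert (m.1, m.2.1) m.2.2) PySem.Dict.empty
    let available : PySem.Set (Int × Int) :=
      PySem.Set.ofList (PySem.Dict.keys points_with_scores)
    let sorted_unique_points :=
      PySem.List.sorted2 available (fun p => p.1) (fun p => p.2)
    let res := sorted_unique_points.foldl
      (pmfvStepA available match_type sorted_unique_points.length) ([], PySem.Set.empty)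
    (res.1, sorted_unique_points.foldl (pmfvIsoStepA points_with_scores res.2) [])

-- ===== PORT B =====
-- B's `while` chase along the diagonal; fuel (= number of points) only bounds iterations
def pmfvChaseB (pts : PySem.Set (Int × Int)) (dr : Int) :
    Nat → Int → Int → Int × Int
  | 0, qe, re => (qe, re)
  | fuel + 1, qe, re =>
    if PySem.Set.contains pts (qe + 1, re + dr) then pmfvChaseB pts dr fuel (qe + 1) (re + dr)
    else (qe, re)

-- body of B's single `for` loop (state = (segments, isolated))
def pmfvStepB (pts : PySem.Set (Int × Int)) (scores : PySem.Dict (Int × Int) Int) (dr : Int)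
    (st : List (Int × Int × Int × Int) × List (Int × Int × Int)) (p : Int × Int) :
    List (Int × Int × Int × Int) × List (Int × Int × Int) :=
  if PySem.Set.contains pts (p.1 - 1, p.2 - dr) then st
  else
    let e := pmfvChaseB pts dr (PySem.Set.len pts).toNat p.1 p.2
    if e ≠ p then (st.1 ++ [(p.1, p.2, e.1, e.2)], st.2)
    else (st.1, st.2 ++ [(p.1, p.2, scores.getD p 0)])

def process_matches_for_visualization_alt (raw_matches : List (Int × Int × Int)) (match_type : String) :
    (List (Int × Int × Int × Int)) × (List (Int × Int × Int)) :=
  match raw_matches with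
  | [] => ([], [])
  | _ :: _ =>
    let scores : PySem.Dict (Int × Int) Int :=
      raw_matches.foldl (fun d m => d.insert (m.1, m.2.1) m.2.2) PySem.Dict.empty
    let pts : PySem.Set (Int × Int) := PySem.Set.ofList (PySem.Dict.keys scores)
    let dr : Int := if match_type == "forward" then 1 else -1
    -- sorted(pts): Python tuple order is lexicographic, i.e. key (p[0], p[1])
    (PySem.List.sorted2 pts (fun p => p.1) (fun p => p.2)).foldl
      (pmfvStepB pts scores dr) ([], [])

-- ===== PRECONDITION & SPEC =====
def Spec_process_matches_for_visualization (raw_matches : List (Int × Int × Int)) (match_type : String) (out : (List (Int × Int × Int × Int)) × (List (Int × Int × Int))) : Prop := out = process_matches_for_visualization_alt raw_matches match_type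
instance (raw_matches : List (Int × Int × Int)) (match_type : String) (out : (List (Int × Int × Int × Int)) × (List (Int × Int × Int))) : Decidable (Spec_process_matches_for_visualization raw_matches match_type out) := by unfold Spec_process_matches_for_visualization; infer_instance

-- ===== CLAIM (what is proved, stated in full; the proofs are below) =====
def Claim_equal_process_matches_for_visualization : Prop := ∀ (raw_matches : List (Int × Int × Int)) (match_type : String), Dom_process_matches_for_visualization raw_matches match_type → Spec_process_matches_for_visualization raw_matches match_type (process_matches_for_visualization raw_matches match_type)

-- ===== LEMMAS AND PROOFS =====

-- diagonal successor / predecessor of a point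
def pmfvSucc (dr : Int) (x : Int × Int) : Int × Int := (x.1 + 1, x.2 + dr)
def pmfvPred (dr : Int) (x : Int × Int) : Int × Int := (x.1 - 1, x.2 - dr)

-- termination measures: how many points of S lie strictly right / left of x (by q)
def pmfvGt (S : List (Int × Int)) (x : Int × Int) : Nat := S.countP (fun y => decide (x.1 < y.1))
def pmfvLt (S : List (Int × Int)) (x : Int × Int) : Nat := S.countP (fun y => decide (y.1 < x.1))

lemma pmfv_countP_lt (P Q : (Int × Int) → Bool) (S : List (Int × Int))
    (h : ∀ a ∈ S, P a = true → Q a = true) (w : Int × Int) (hw : w ∈ S)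
    (hQ : Q w = true) (hP : P w = false) : S.countP P < S.countP Q := by
  induction S with
  | nil => cases hw
  | cons a t ih =>
    rw [List.countP_cons, List.countP_cons]
    rcases List.mem_cons.mp hw with rfl | hw'
    · have h2 : t.countP P ≤ t.countP Q :=
        List.countP_mono_left (fun a ha => h a (List.mem_cons_of_mem _ ha))
      simp [hP, hQ]; omega
    · have h3 := ih (fun a ha hpa => h a (List.mem_cons_of_mem _ ha) hpa) hw'
      have h4 : P a = true → Q a = true := h a List.mem_cons_self
      cases hPa : P a <;> cases hQa : Q a <;> simp_all <;> omega

lemma pmfvGt_step {S : List (Int × Int)} {dr : Int} {x : Int × Int}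
    (h : pmfvSucc dr x ∈ S) : pmfvGt S (pmfvSucc dr x) < pmfvGt S x := by
  refine pmfv_countP_lt _ _ S (fun a _ hpa => ?_) (pmfvSucc dr x) h
    (by simp [pmfvSucc]) (by simp [pmfvSucc])
  simp only [pmfvSucc, decide_eq_true_eq] at hpa ⊢
  omega

lemma pmfvLt_step {S : List (Int × Int)} {dr : Int} {x : Int × Int}
    (h : pmfvPred dr x ∈ S) : pmfvLt S (pmfvPred dr x) < pmfvLt S x := by
  refine pmfv_countP_lt _ _ S (fun a _ hpa => ?_) (pmfvPred dr x) h
    (by simp [pmfvPred]) (by simp [pmfvPred])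
  simp only [pmfvPred, decide_eq_true_eq] at hpa ⊢
  omega

lemma pmfvGt_lt_length {S : List (Int × Int)} {x : Int × Int} (hx : x ∈ S) :
    pmfvGt S x < S.length := by
  have := pmfv_countP_lt (fun y => decide (x.1 < y.1)) (fun _ => true) S
    (fun a _ _ => rfl) x hx rfl (by simp)
  simpa [pmfvGt, List.countP_true] using this

-- start of the maximal diagonal chain through x, its tail and its end
def pmfvStart (S : List (Int × Int)) (dr : Int) (x : Int × Int) : Int × Int :=
  if h : pmfvPred dr x ∈ S then pmfvStart S dr (pmfvPred dr x) else x
termination_by pmfvLt S x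
decreasing_by exact pmfvLt_step h

def pmfvChain (S : List (Int × Int)) (dr : Int) (x : Int × Int) : List (Int × Int) :=
  if h : pmfvSucc dr x ∈ S then pmfvSucc dr x :: pmfvChain S dr (pmfvSucc dr x) else []
termination_by pmfvGt S x
decreasing_by exact pmfvGt_step h

def pmfvEnd (S : List (Int × Int)) (dr : Int) (x : Int × Int) : Int × Int :=
  if h : pmfvSucc dr x ∈ S then pmfvEnd S dr (pmfvSucc dr x) else x
termination_by pmfvGt S x
decreasing_by exact pmfvGt_step h

lemma pmfvPred_succ (dr : Int) (x : Int × Int) : pmfvPred dr (pmfvSucc dr x) = x := by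
  cases x; simp [pmfvPred, pmfvSucc]

lemma pmfvSucc_pred (dr : Int) (x : Int × Int) : pmfvSucc dr (pmfvPred dr x) = x := by
  cases x; simp [pmfvPred, pmfvSucc]

lemma pmfvStart_eq_self {S : List (Int × Int)} {dr : Int} {x : Int × Int}
    (h : pmfvPred dr x ∉ S) : pmfvStart S dr x = x := by
  rw [pmfvStart]; simp [h]

lemma pmfvStart_pred {S : List (Int × Int)} {dr : Int} {x : Int × Int}
    (h : pmfvPred dr x ∈ S) : pmfvStart S dr x = pmfvStart S dr (pmfvPred dr x) := by
  conv_lhs => rw [pmfvStart]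
  simp [h]

lemma pmfvStart_succ {S : List (Int × Int)} {dr : Int} {x : Int × Int} (hx : x ∈ S) :
    pmfvStart S dr (pmfvSucc dr x) = pmfvStart S dr x := by
  have h : pmfvPred dr (pmfvSucc dr x) ∈ S := by rw [pmfvPred_succ]; exact hx
  rw [pmfvStart_pred h, pmfvPred_succ]

lemma pmfvStart_mem {S : List (Int × Int)} {dr : Int} {x : Int × Int} (hx : x ∈ S) :
    pmfvStart S dr x ∈ S := by
  revert hx
  induction x using pmfvStart.induct S dr with
  | case1 x h ih => intro _; rw [pmfvStart_pred h]; exact ih h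
  | case2 x h => intro hx; rw [pmfvStart_eq_self h]; exact hx

lemma pmfvStart_fst_le (S : List (Int × Int)) (dr : Int) (x : Int × Int) :
    (pmfvStart S dr x).1 ≤ x.1 := by
  induction x using pmfvStart.induct S dr with
  | case1 x h ih => rw [pmfvStart_pred h]; simp [pmfvPred] at ih ⊢; omega
  | case2 x h => rw [pmfvStart_eq_self h]

lemma pmfvStart_pred_not_mem (S : List (Int × Int)) (dr : Int) (x : Int × Int) :
    pmfvPred dr (pmfvStart S dr x) ∉ S := by
  induction x using pmfvStart.induct S dr with
  | case1 x h ih => rw [pmfvStart_pred h]; exact ih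
  | case2 x h => rw [pmfvStart_eq_self h]; exact h

lemma pmfvChain_nil {S : List (Int × Int)} {dr : Int} {x : Int × Int}
    (h : pmfvSucc dr x ∉ S) : pmfvChain S dr x = [] := by
  rw [pmfvChain]; simp [h]

lemma pmfvChain_cons {S : List (Int × Int)} {dr : Int} {x : Int × Int}
    (h : pmfvSucc dr x ∈ S) : pmfvChain S dr x = pmfvSucc dr x :: pmfvChain S dr (pmfvSucc dr x) := by
  conv_lhs => rw [pmfvChain]
  simp [h]

lemma pmfvEnd_eq_self {S : List (Int × Int)} {dr : Int} {x : Int × Int}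
    (h : pmfvSucc dr x ∉ S) : pmfvEnd S dr x = x := by
  rw [pmfvEnd]; simp [h]

lemma pmfvEnd_succ {S : List (Int × Int)} {dr : Int} {x : Int × Int}
    (h : pmfvSucc dr x ∈ S) : pmfvEnd S dr x = pmfvEnd S dr (pmfvSucc dr x) := by
  conv_lhs => rw [pmfvEnd]
  simp [h]

lemma pmfvEnd_fst_le (S : List (Int × Int)) (dr : Int) (x : Int × Int) :
    x.1 ≤ (pmfvEnd S dr x).1 := by
  induction x using pmfvEnd.induct S dr with
  | case1 x h ih =>
    rw [pmfvEnd_succ h]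
    have h2 : x.1 ≤ (pmfvSucc dr x).1 := by simp [pmfvSucc]
    omega
  | case2 x h => rw [pmfvEnd_eq_self h]

lemma pmfvEnd_ne {S : List (Int × Int)} {dr : Int} {x : Int × Int}
    (h : pmfvSucc dr x ∈ S) : pmfvEnd S dr x ≠ x := by
  rw [pmfvEnd_succ h]
  have := pmfvEnd_fst_le S dr (pmfvSucc dr x)
  intro heq
  rw [heq] at this
  simp only [pmfvSucc] at this
  omega

lemma pmfvChain_pred_mem {S : List (Int × Int)} {dr : Int} {x : Int × Int} (hx : x ∈ S) :
    ∀ y ∈ pmfvChain S dr x, pmfvPred dr y ∈ S := by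
  revert hx
  induction x using pmfvChain.induct S dr with
  | case1 x h ih =>
    intro hx y hy
    rw [pmfvChain_cons h] at hy
    rcases List.mem_cons.mp hy with rfl | hy'
    · rw [pmfvPred_succ]; exact hx
    · exact ih h y hy'
  | case2 x h => intro _ y hy; rw [pmfvChain_nil h] at hy; cases hy

lemma pmfvChain_succ_closed {S : List (Int × Int)} {dr : Int} {x : Int × Int} :
    ∀ z ∈ x :: pmfvChain S dr x, pmfvSucc dr z ∈ S → pmfvSucc dr z ∈ x :: pmfvChain S dr x := by
  induction x using pmfvChain.induct S dr with
  | case1 x h ih =>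
    intro z hz hs
    rw [pmfvChain_cons h] at hz ⊢
    rcases List.mem_cons.mp hz with rfl | hz'
    · exact List.mem_cons_of_mem _ List.mem_cons_self
    · exact List.mem_cons_of_mem _ (ih z hz' hs)
  | case2 x h =>
    intro z hz hs
    rw [pmfvChain_nil h] at hz
    rcases List.mem_cons.mp hz with rfl | hz'
    · exact absurd hs h
    · cases hz'

lemma pmfv_mem_start_chain {S : List (Int × Int)} {dr : Int} {x : Int × Int} (hx : x ∈ S) :
    x ∈ pmfvStart S dr x :: pmfvChain S dr (pmfvStart S dr x) := by
  revert hx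
  induction x using pmfvStart.induct S dr with
  | case1 x h ih =>
    intro hx
    rw [pmfvStart_pred h]
    have hmem := ih h
    have := pmfvChain_succ_closed _ hmem (by rw [pmfvSucc_pred]; exact hx)
    rwa [pmfvSucc_pred] at this
  | case2 x h => intro _; rw [pmfvStart_eq_self h]; exact List.mem_cons_self

lemma pmfv_chain_start {S : List (Int × Int)} {dr : Int} {x : Int × Int} (hx : x ∈ S) :
    ∀ y ∈ x :: pmfvChain S dr x, y ∈ S ∧ pmfvStart S dr y = pmfvStart S dr x := by
  revert hx
  induction x using pmfvChain.induct S dr with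
  | case1 x h ih =>
    intro hx y hy
    rw [pmfvChain_cons h] at hy
    rcases List.mem_cons.mp hy with rfl | hy'
    · exact ⟨hx, rfl⟩
    · have := ih h y hy'
      rwa [pmfvStart_succ hx] at this
  | case2 x h =>
    intro hx y hy
    rw [pmfvChain_nil h] at hy
    rcases List.mem_cons.mp hy with rfl | hy'
    · exact ⟨hx, rfl⟩
    · cases hy'

lemma pmfv_chain_char {S : List (Int × Int)} {dr : Int} {p : Int × Int}
    (hp : p ∈ S) (hstart : pmfvPred dr p ∉ S) (y : Int × Int) :
    y ∈ p :: pmfvChain S dr p ↔ y ∈ S ∧ pmfvStart S dr y = p := by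
  constructor
  · intro h
    have := pmfv_chain_start hp y h
    rwa [pmfvStart_eq_self hstart] at this
  · rintro ⟨hy, hs⟩
    have := pmfv_mem_start_chain (S := S) (dr := dr) hy
    rwa [hs] at this

lemma pmfvEnd_getLastD (S : List (Int × Int)) (dr : Int) (x : Int × Int) :
    (pmfvChain S dr x).getLastD x = pmfvEnd S dr x := by
  induction x using pmfvEnd.induct S dr with
  | case1 x h ih => rw [pmfvChain_cons h, pmfvEnd_succ h, List.getLastD_cons]; exact ih
  | case2 x h => rw [pmfvChain_nil h, pmfvEnd_eq_self h]; rfl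

-- python list[0] / list[-1] on a nonempty list
lemma pmfv_pyGetD_zero (a : Int × Int) (l : List (Int × Int)) (d : Int × Int) :
    PySem.List.pyGetD (a :: l) 0 d = a := by
  simp [pysem]

lemma pmfv_pyGetD_neg_one : ∀ (l : List (Int × Int)) (a d : Int × Int),
    PySem.List.pyGetD (a :: l) (-1) d = l.getLastD a := by
  intro l
  induction l with
  | nil => intro a d; simp [pysem]
  | cons b t ih =>
    intro a d
    have h1 : PySem.List.pyGetD (a :: b :: t) (-1) d = PySem.List.pyGetD (b :: t) (-1) d := by
      simp only [PySem.List.pyGetD]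
      congr 1
      simp only [PySem.List.pyGet?, PySem.List.pyIdx?]
      norm_num
      rfl
    rw [h1, ih, List.getLastD_cons]

-- the fuelled chase of B computes the pure chain end
lemma pmfvChaseB_eq (S : PySem.Set (Int × Int)) (dr : Int) :
    ∀ (fuel : Nat) (x : Int × Int), pmfvGt S x < fuel →
      pmfvChaseB S dr fuel x.1 x.2 = pmfvEnd S dr x := by
  intro fuel
  induction fuel with
  | zero => intro x hx; omega
  | succ f ih =>
    intro x hx
    have hnx : (x.1 + 1, x.2 + dr) = pmfvSucc dr x := rfl
    rw [pmfvChaseB]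
    by_cases hs : pmfvSucc dr x ∈ S
    · rw [if_pos (by rw [hnx, PySem.Set.contains_iff]; exact hs)]
      have : pmfvChaseB S dr f (x.1 + 1) (x.2 + dr)
          = pmfvChaseB S dr f (pmfvSucc dr x).1 (pmfvSucc dr x).2 := rfl
      rw [this, ih _ (by have := pmfvGt_step hs; omega), pmfvEnd_succ hs]
    · rw [if_neg (by rw [hnx, PySem.Set.contains_iff]; exact hs), pmfvEnd_eq_self hs]

-- A's extension loop: the visited test never fires on a fresh chain, so it
-- computes the pure chain and its end
lemma pmfvExtendA_eq (S : PySem.Set (Int × Int)) (dr : Int) (mt : String)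
    (hdr : dr = if mt == "forward" then 1 else -1) (V : PySem.Set (Int × Int)) (s0 : Int × Int)
    (hV : ∀ y ∈ S, pmfvStart S dr y = s0 → y ∉ V) :
    ∀ (fuel : Nat) (cur : Int × Int) (path : List (Int × Int)),
      cur ∈ S → pmfvStart S dr cur = s0 → pmfvGt S cur < fuel →
      pmfvExtendA S V mt fuel path cur = (path ++ pmfvChain S dr cur, pmfvEnd S dr cur) := by
  intro fuel
  induction fuel with
  | zero => intro cur path _ _ h; omega
  | succ f ih =>
    intro cur path hcur hs0 hfuel
    rw [pmfvExtendA]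
    have hnxt : (if mt == "forward" then (cur.1 + 1, cur.2 + 1) else (cur.1 + 1, cur.2 - 1))
        = pmfvSucc dr cur := by
      by_cases h : mt == "forward" <;> simp [h] at hdr ⊢ <;>
        simp [pmfvSucc, hdr] <;> omega
    rw [hnxt]
    by_cases hs : pmfvSucc dr cur ∈ S
    · have hsV : pmfvSucc dr cur ∉ V :=
        hV _ hs (by rw [pmfvStart_succ hcur]; exact hs0)
      rw [if_pos (by simp [PySem.Set.contains_iff, hs, hsV])]
      rw [ih (pmfvSucc dr cur) (path ++ [pmfvSucc dr cur]) hs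
        (by rw [pmfvStart_succ hcur]; exact hs0)
        (by have := pmfvGt_step hs; omega)]
      rw [pmfvChain_cons hs, pmfvEnd_succ hs]
      simp
    · rw [if_neg (by simp [PySem.Set.contains_iff, hs])]
      rw [pmfvChain_nil hs, pmfvEnd_eq_self hs]
      simp

-- the canonical results: segments / isolated points contributed by the points of l
def pmfvSegs (S : List (Int × Int)) (dr : Int) (l : List (Int × Int)) :
    List (Int × Int × Int × Int) :=
  l.filterMap (fun p =>
    if pmfvPred dr p ∉ S ∧ pmfvSucc dr p ∈ S then
      some (p.1, p.2, (pmfvEnd S dr p).1, (pmfvEnd S dr p).2)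
    else none)

def pmfvIso (S : List (Int × Int)) (dr : Int) (pws : PySem.Dict (Int × Int) Int)
    (l : List (Int × Int)) : List (Int × Int × Int) :=
  l.filterMap (fun p =>
    if pmfvPred dr p ∉ S ∧ pmfvSucc dr p ∉ S then some (p.1, p.2, pws.getD p 0) else none)

-- A's main loop: produces the canonical segments, and visited ends up holding exactly
-- the points of S whose chain has ≥ 2 elements and whose chain start was processed
lemma pmfv_foldA (S : PySem.Set (Int × Int)) (dr : Int) (mt : String)
    (hdr : dr = if mt == "forward" then 1 else -1) (L0 : List (Int × Int))
    (hperm : L0.Perm S) (hndL : L0.Nodup)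
    (hsorted : L0.Pairwise (fun a b => a.1 < b.1 ∨ (a.1 = b.1 ∧ a.2 ≤ b.2))) :
    ∀ (l pre : List (Int × Int)), pre ++ l = L0 →
      ∀ (segs : List (Int × Int × Int × Int)) (V : PySem.Set (Int × Int)),
        (∀ x, x ∈ V ↔ x ∈ S ∧ (pmfvPred dr x ∈ S ∨ pmfvSucc dr x ∈ S) ∧ pmfvStart S dr x ∈ pre) →
        ∃ V', l.foldl (pmfvStepA S mt L0.length) (segs, V) = (segs ++ pmfvSegs S dr l, V') ∧
          ∀ x, x ∈ V' ↔ x ∈ S ∧ (pmfvPred dr x ∈ S ∨ pmfvSucc dr x ∈ S) ∧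
            pmfvStart S dr x ∈ pre ++ l := by
  intro l
  induction l with
  | nil =>
    intro pre hpre segs V hV
    exact ⟨V, by simp [pmfvSegs], by simpa using hV⟩
  | cons p l' ih =>
    intro pre hpre segs V hV
    have hpL : p ∈ L0 := by rw [← hpre]; exact List.mem_append_right _ List.mem_cons_self
    have hpS : p ∈ S := hperm.mem_iff.mp hpL
    have hndL2 : (pre ++ p :: l').Nodup := by rw [hpre]; exact hndL
    have hppre : p ∉ pre := fun h =>
      (List.disjoint_of_nodup_append hndL2) h List.mem_cons_self
    have hpl' : p ∉ l' := (List.nodup_cons.mp hndL2.of_append_right).1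
    have hsorted2 : (pre ++ p :: l').Pairwise (fun a b => a.1 < b.1 ∨ (a.1 = b.1 ∧ a.2 ≤ b.2)) := by
      rw [hpre]; exact hsorted
    rw [List.pairwise_append] at hsorted2
    have hboundary : ∀ z, z ∈ S → z.1 < p.1 → z ∈ pre := by
      intro z hzS hzlt
      have hzL : z ∈ L0 := hperm.mem_iff.mpr hzS
      rw [← hpre, List.mem_append] at hzL
      rcases hzL with h | h
      · exact h
      · rcases List.mem_cons.mp h with rfl | h'
        · omega
        · have := (List.pairwise_cons.mp hsorted2.2.1).1 z h'
          rcases this with h1 | h1 <;> omega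
    rw [List.foldl_cons]
    by_cases hpred : pmfvPred dr p ∈ S
    · -- p was already swallowed by an earlier segment: skipped
      have hpV : p ∈ V := by
        rw [hV p]
        refine ⟨hpS, Or.inl hpred, ?_⟩
        have h1 : pmfvStart S dr p = pmfvStart S dr (pmfvPred dr p) := pmfvStart_pred hpred
        have h2 : pmfvStart S dr (pmfvPred dr p) ∈ S := pmfvStart_mem hpred
        have h3 : (pmfvStart S dr (pmfvPred dr p)).1 ≤ (pmfvPred dr p).1 :=
          pmfvStart_fst_le S dr (pmfvPred dr p)
        rw [h1]
        exact hboundary _ h2 (by simp [pmfvPred] at h3 ⊢; omega)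
      have hstep : pmfvStepA S mt L0.length (segs, V) p = (segs, V) := by
        unfold pmfvStepA
        rw [if_pos (by simpa [PySem.Set.contains_iff] using hpV)]
      rw [hstep]
      have hsegs : pmfvSegs S dr (p :: l') = pmfvSegs S dr l' := by
        unfold pmfvSegs
        rw [List.filterMap_cons]
        simp [hpred]
      rw [hsegs]
      have hVnew : ∀ x, x ∈ V ↔ x ∈ S ∧ (pmfvPred dr x ∈ S ∨ pmfvSucc dr x ∈ S) ∧
          pmfvStart S dr x ∈ pre ++ [p] := by
        intro x
        rw [hV x]
        constructor
        · rintro ⟨a, b, c⟩; exact ⟨a, b, List.mem_append_left _ c⟩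
        · rintro ⟨a, b, c⟩
          refine ⟨a, b, ?_⟩
          rcases List.mem_append.mp c with h | h
          · exact h
          · rcases List.mem_cons.mp h with h' | h'
            · exfalso
              have := pmfvStart_pred_not_mem S dr x
              rw [h'] at this
              exact this hpred
            · cases h'
      obtain ⟨V', h1, h2⟩ := ih (pre ++ [p]) (by simpa using hpre) segs V hVnew
      exact ⟨V', h1, by intro x; rw [h2 x]; simp⟩
    · -- p starts a fresh (possibly trivial) chain
      have hpV : p ∉ V := by
        intro h
        have := ((hV p).mp h).2.2
        rw [pmfvStart_eq_self hpred] at this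
        exact hppre this
      have hVdisj : ∀ y ∈ S, pmfvStart S dr y = p → y ∉ V := by
        intro y hy hsy hyV
        have := ((hV y).mp hyV).2.2
        rw [hsy] at this
        exact hppre this
      have hfuel : pmfvGt S p < L0.length := by
        rw [hperm.length_eq]; exact pmfvGt_lt_length hpS
      have hext := pmfvExtendA_eq S dr mt hdr V p hVdisj L0.length p [p] hpS
        (pmfvStart_eq_self hpred) hfuel
      have hstep0 : pmfvStepA S mt L0.length (segs, V) p
          = (if 1 < ([p] ++ pmfvChain S dr p).length then
              (segs ++ [((PySem.List.pyGetD ([p] ++ pmfvChain S dr p) 0 p).1,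
                         (PySem.List.pyGetD ([p] ++ pmfvChain S dr p) 0 p).2,
                         (PySem.List.pyGetD ([p] ++ pmfvChain S dr p) (-1) p).1,
                         (PySem.List.pyGetD ([p] ++ pmfvChain S dr p) (-1) p).2)],
               ([p] ++ pmfvChain S dr p).foldl PySem.Set.add V)
             else (segs, V)) := by
        unfold pmfvStepA
        rw [if_neg (by simpa [PySem.Set.contains_iff] using hpV)]
        rw [hext]
      by_cases hsucc : pmfvSucc dr p ∈ S
      · -- nontrivial chain: a segment is emitted, the whole chain becomes visited
        have hchain := pmfvChain_cons (S := S) (dr := dr) hsucc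
        have hlen : 1 < ([p] ++ pmfvChain S dr p).length := by
          rw [hchain]; simp
        rw [hstep0, if_pos hlen]
        have hget0 : PySem.List.pyGetD ([p] ++ pmfvChain S dr p) 0 p = p :=
          pmfv_pyGetD_zero _ _ _
        have hgetl : PySem.List.pyGetD ([p] ++ pmfvChain S dr p) (-1) p = pmfvEnd S dr p := by
          rw [List.singleton_append, pmfv_pyGetD_neg_one, pmfvEnd_getLastD]
        rw [hget0, hgetl]
        have hVup : ∀ x, x ∈ ([p] ++ pmfvChain S dr p).foldl PySem.Set.add V ↔
            x ∈ V ∨ x ∈ p :: pmfvChain S dr p := by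
          intro x
          have : ([p] ++ pmfvChain S dr p).foldl PySem.Set.add V
              = PySem.Set.update V ([p] ++ pmfvChain S dr p) := rfl
          rw [this, PySem.Set.mem_update]
          simp
        have hVnew : ∀ x, x ∈ ([p] ++ pmfvChain S dr p).foldl PySem.Set.add V ↔
            x ∈ S ∧ (pmfvPred dr x ∈ S ∨ pmfvSucc dr x ∈ S) ∧
            pmfvStart S dr x ∈ pre ++ [p] := by
          intro x
          rw [hVup x, hV x]
          constructor
          · rintro (⟨a, b, c⟩ | hx)
            · exact ⟨a, b, List.mem_append_left _ c⟩
            · have hx' := (pmfv_chain_char hpS hpred x).mp hx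
              refine ⟨hx'.1, ?_, List.mem_append_right _ (by simp [hx'.2])⟩
              rcases List.mem_cons.mp hx with rfl | hxc
              · exact Or.inr hsucc
              · exact Or.inl (pmfvChain_pred_mem hpS x hxc)
          · rintro ⟨a, b, c⟩
            rcases List.mem_append.mp c with h | h
            · exact Or.inl ⟨a, b, h⟩
            · rcases List.mem_cons.mp h with h' | h'
              · exact Or.inr ((pmfv_chain_char hpS hpred x).mpr ⟨a, h'⟩)
              · cases h'
        obtain ⟨V', h1, h2⟩ := ih (pre ++ [p]) (by simpa using hpre)
          (segs ++ [(p.1, p.2, (pmfvEnd S dr p).1, (pmfvEnd S dr p).2)])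
          (([p] ++ pmfvChain S dr p).foldl PySem.Set.add V) hVnew
        refine ⟨V', ?_, by intro x; rw [h2 x]; simp⟩
        rw [h1]
        have hscons : pmfvSegs S dr (p :: l')
            = (p.1, p.2, (pmfvEnd S dr p).1, (pmfvEnd S dr p).2) :: pmfvSegs S dr l' := by
          unfold pmfvSegs
          rw [List.filterMap_cons]
          simp [hpred, hsucc]
        rw [hscons]
        simp
      · -- trivial chain: nothing happens (the point will be isolated)
        have hchain := pmfvChain_nil (S := S) (dr := dr) hsucc
        rw [hstep0, hchain, if_neg (by simp)]
        have hsegs : pmfvSegs S dr (p :: l') = pmfvSegs S dr l' := by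
          unfold pmfvSegs
          rw [List.filterMap_cons]
          simp [hsucc]
        rw [hsegs]
        have hVnew : ∀ x, x ∈ V ↔ x ∈ S ∧ (pmfvPred dr x ∈ S ∨ pmfvSucc dr x ∈ S) ∧
            pmfvStart S dr x ∈ pre ++ [p] := by
          intro x
          rw [hV x]
          constructor
          · rintro ⟨a, b, c⟩; exact ⟨a, b, List.mem_append_left _ c⟩
          · rintro ⟨a, b, c⟩
            refine ⟨a, b, ?_⟩
            rcases List.mem_append.mp c with h | h
            · exact h
            · rcases List.mem_cons.mp h with h' | h'
              · exfalso
                have hx := (pmfv_chain_char hpS hpred x).mpr ⟨a, h'⟩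
                rw [hchain] at hx
                rcases List.mem_cons.mp hx with rfl | hc
                · rcases b with b | b
                  · exact hpred b
                  · exact hsucc b
                · cases hc
              · cases h'
        obtain ⟨V', h1, h2⟩ := ih (pre ++ [p]) (by simpa using hpre) segs V hVnew
        exact ⟨V', h1, by intro x; rw [h2 x]; simp⟩

-- A's second loop: collect the canonical isolated points
lemma pmfv_foldIso (S : PySem.Set (Int × Int)) (dr : Int) (pws : PySem.Dict (Int × Int) Int)
    (Vf : PySem.Set (Int × Int))
    (hVf : ∀ x, x ∈ Vf ↔ x ∈ S ∧ (pmfvPred dr x ∈ S ∨ pmfvSucc dr x ∈ S)) :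
    ∀ (l : List (Int × Int)) (acc : List (Int × Int × Int)), (∀ p ∈ l, p ∈ S) →
      l.foldl (pmfvIsoStepA pws Vf) acc = acc ++ pmfvIso S dr pws l := by
  intro l
  induction l with
  | nil => intro acc _; simp [pmfvIso]
  | cons p l' ih =>
    intro acc hl
    have hpS : p ∈ S := hl p List.mem_cons_self
    have hrest := fun q hq => hl q (List.mem_cons_of_mem _ hq)
    rw [List.foldl_cons]
    by_cases h : pmfvPred dr p ∈ S ∨ pmfvSucc dr p ∈ S
    · have hpV : p ∈ Vf := (hVf p).mpr ⟨hpS, h⟩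
      have hstep : pmfvIsoStepA pws Vf acc p = acc := by
        unfold pmfvIsoStepA
        rw [if_pos (by simpa [PySem.Set.contains_iff] using hpV)]
      have hcons : pmfvIso S dr pws (p :: l') = pmfvIso S dr pws l' := by
        unfold pmfvIso
        rw [List.filterMap_cons]
        rcases h with h | h <;> simp [h]
      rw [hstep, hcons, ih acc hrest]
    · rw [not_or] at h
      have hpV : p ∉ Vf := fun hx => absurd ((hVf p).mp hx).2 (by tauto)
      have hstep : pmfvIsoStepA pws Vf acc p = acc ++ [(p.1, p.2, pws.getD p 0)] := by
        unfold pmfvIsoStepA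
        rw [if_neg (by simpa [PySem.Set.contains_iff] using hpV)]
      have hcons : pmfvIso S dr pws (p :: l')
          = (p.1, p.2, pws.getD p 0) :: pmfvIso S dr pws l' := by
        unfold pmfvIso
        rw [List.filterMap_cons]
        simp [h.1, h.2]
      rw [hstep, hcons, ih _ hrest]
      simp

-- B's single loop computes the canonical pair directly
lemma pmfv_foldB (S : PySem.Set (Int × Int)) (dr : Int) (scores : PySem.Dict (Int × Int) Int) :
    ∀ (l : List (Int × Int)) (s : List (Int × Int × Int × Int)) (i : List (Int × Int × Int)),
      (∀ p ∈ l, p ∈ S) →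
      l.foldl (pmfvStepB S scores dr) (s, i) = (s ++ pmfvSegs S dr l, i ++ pmfvIso S dr scores l) := by
  intro l
  induction l with
  | nil => intro s i _; simp [pmfvSegs, pmfvIso]
  | cons p l' ih =>
    intro s i hl
    have hpS : p ∈ S := hl p List.mem_cons_self
    have hrest := fun q hq => hl q (List.mem_cons_of_mem _ hq)
    rw [List.foldl_cons]
    have hpp : ((p.1 - 1, p.2 - dr) : Int × Int) = pmfvPred dr p := rfl
    by_cases hpred : pmfvPred dr p ∈ S
    · have hstep : pmfvStepB S scores dr (s, i) p = (s, i) := by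
        unfold pmfvStepB
        rw [if_pos (by rw [hpp, PySem.Set.contains_iff]; exact hpred)]
      rw [hstep, ih s i hrest]
      have h1 : pmfvSegs S dr (p :: l') = pmfvSegs S dr l' := by
        unfold pmfvSegs; rw [List.filterMap_cons]; simp [hpred]
      have h2 : pmfvIso S dr scores (p :: l') = pmfvIso S dr scores l' := by
        unfold pmfvIso; rw [List.filterMap_cons]; simp [hpred]
      rw [h1, h2]
    · have hfuel : pmfvGt S p < (PySem.Set.len S).toNat := by
        have := pmfvGt_lt_length hpS
        simp [PySem.Set.len]
        omega
      have hchase : pmfvChaseB S dr (PySem.Set.len S).toNat p.1 p.2 = pmfvEnd S dr p :=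
        pmfvChaseB_eq S dr _ p hfuel
      by_cases hsucc : pmfvSucc dr p ∈ S
      · have hne : pmfvEnd S dr p ≠ p := pmfvEnd_ne hsucc
        have hstep : pmfvStepB S scores dr (s, i) p
            = (s ++ [(p.1, p.2, (pmfvEnd S dr p).1, (pmfvEnd S dr p).2)], i) := by
          unfold pmfvStepB
          rw [if_neg (by rw [hpp, PySem.Set.contains_iff]; exact hpred)]
          simp only [hchase]
          rw [if_pos hne]
        rw [hstep, ih _ _ hrest]
        have h1 : pmfvSegs S dr (p :: l')
            = (p.1, p.2, (pmfvEnd S dr p).1, (pmfvEnd S dr p).2) :: pmfvSegs S dr l' := by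
          unfold pmfvSegs; rw [List.filterMap_cons]; simp [hpred, hsucc]
        have h2 : pmfvIso S dr scores (p :: l') = pmfvIso S dr scores l' := by
          unfold pmfvIso; rw [List.filterMap_cons]; simp [hsucc]
        rw [h1, h2]
        simp
      · have heq : pmfvEnd S dr p = p := pmfvEnd_eq_self hsucc
        have hstep : pmfvStepB S scores dr (s, i) p
            = (s, i ++ [(p.1, p.2, scores.getD p 0)]) := by
          unfold pmfvStepB
          rw [if_neg (by rw [hpp, PySem.Set.contains_iff]; exact hpred)]
          simp only [hchase, heq]
          rw [if_neg (by simp)]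
        rw [hstep, ih _ _ hrest]
        have h1 : pmfvSegs S dr (p :: l') = pmfvSegs S dr l' := by
          unfold pmfvSegs; rw [List.filterMap_cons]; simp [hsucc]
        have h2 : pmfvIso S dr scores (p :: l')
            = (p.1, p.2, scores.getD p 0) :: pmfvIso S dr scores l' := by
          unfold pmfvIso; rw [List.filterMap_cons]; simp [hpred, hsucc]
        rw [h1, h2]
        simp

-- Python's sorted(points) on int pairs is sorting by the lexicographic key
lemma pmfv_sorted2_eq (S : List (Int × Int)) :
    PySem.List.sorted2 S (fun p => p.1) (fun p => p.2)
      = PySem.List.sorted S (fun p => toLex p) := by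
  rw [PySem.List.sorted_eq_foldl_insertBy]
  unfold PySem.List.sorted2
  simp only [if_neg (by decide : ¬ (false = true))]
  congr 1
  funext acc x
  congr 1
  funext a b
  rw [Bool.eq_iff_iff]
  simp only [Bool.or_eq_true, Bool.and_eq_true, Bool.not_eq_true', decide_eq_true_eq,
    decide_eq_false_iff_not, Prod.Lex.lt_iff, ofLex_toLex]
  omega

-- ===== VERDICT (by name: the statement is the Claim_ definition above) =====
theorem process_matches_for_visualization_spec : Claim_equal_process_matches_for_visualization := by
  unfold Claim_equal_process_matches_for_visualization
  intro raw mt _hdom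
  unfold Spec_process_matches_for_visualization
  cases raw with
  | nil => rfl
  | cons m0 rest =>
    unfold process_matches_for_visualization process_matches_for_visualization_alt
    dsimp only
    rw [pmfv_sorted2_eq]
    set pws := (m0 :: rest).foldl (fun d m => d.insert (m.1, m.2.1) m.2.2) PySem.Dict.empty with hpws
    set S := PySem.Set.ofList (PySem.Dict.keys pws) with hSdef
    set dr : Int := if mt == "forward" then 1 else -1 with hdr
    set L0 := PySem.List.sorted S (fun p => toLex p) with hL0
    have hndS : S.Nodup := PySem.Set.nodup_ofList _
    have hperm : L0.Perm S := PySem.List.sorted_perm S _ false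
    have hndL : L0.Nodup := hperm.nodup_iff.mpr hndS
    have hsorted : L0.Pairwise (fun a b => a.1 < b.1 ∨ (a.1 = b.1 ∧ a.2 ≤ b.2)) := by
      have hp := PySem.List.sorted_pairwise S (fun p : Int × Int => toLex p)
      exact hp.imp (by intro a b h; simpa [Prod.Lex.le_iff] using h)
    obtain ⟨Vf, hfold, hVf⟩ := pmfv_foldA S dr mt hdr L0 hperm hndL hsorted L0 [] rfl []
      PySem.Set.empty (by intro x; simp [PySem.Set.empty])
    rw [hfold]
    have hVf' : ∀ x, x ∈ Vf ↔ x ∈ S ∧ (pmfvPred dr x ∈ S ∨ pmfvSucc dr x ∈ S) := by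
      intro x
      rw [hVf x]
      constructor
      · rintro ⟨a, b, _⟩; exact ⟨a, b⟩
      · rintro ⟨a, b⟩
        exact ⟨a, b, by simpa using hperm.mem_iff.mpr (pmfvStart_mem a)⟩
    rw [pmfv_foldIso S dr pws Vf hVf' L0 [] (fun p hp => hperm.mem_iff.mp hp)]
    rw [pmfv_foldB S dr pws L0 [] [] (fun p hp => hperm.mem_iff.mp hp)]
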